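-- pv_equiv track=rewrite | github.com/mh3r/advent_of_code_solutions | advent2024/src/day12.py | simplifySides
-- ===== SOURCE A (Python) =====
-- def simplifySides(lrCoords):
--     sides = 0
--
--     while len(lrCoords) > 0:
--         y, x = lrCoords.pop()
--         sides += 1
--
--         for i in range(1, len(lrCoords) + 1):
--             newY = y + i
--             if (newY, x) in lrCoords:
--                 lrCoords.remove((newY, x))
--             else:
--                 break
--
--         for i in range(1, len(lrCoords) + 1):
--             newY = y - i
--             if (newY, x) in lrCoords:
--                 lrCoords.remove((newY, x))
--             else:
--                 break
--
--     return sides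
-- ===== SOURCE B (Python) =====
-- def simplifySides(lrCoords):
--     # A vertical segment (maximal run) is uniquely identified by its bottom
--     # cell: a coordinate whose predecessor (y-1, x) is absent.  One
--     # non-destructive pass counts those; then empty lrCoords in place,
--     # matching A's side effect of consuming its argument.
--     sides = sum(1 for y, x in lrCoords if (y - 1, x) not in lrCoords)
--     lrCoords.clear()
--     return sides
-- ===== Notes on version B (the rewrite author's own statement) =====
-- stated objective: simpler
-- what changed: Replaces the destructive pop/remove flood-fill loop by a single non-destructive pass that counts run bottoms (coordinates whose (y-1,x) predecessor is absent), then clears the argument to keep A's emptying side effect.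
-- outside the precondition, e.g. on simplifySides([(0, 0), (1, 0), (1, 0)]): A returns 2, B returns 1
import Mathlib
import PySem

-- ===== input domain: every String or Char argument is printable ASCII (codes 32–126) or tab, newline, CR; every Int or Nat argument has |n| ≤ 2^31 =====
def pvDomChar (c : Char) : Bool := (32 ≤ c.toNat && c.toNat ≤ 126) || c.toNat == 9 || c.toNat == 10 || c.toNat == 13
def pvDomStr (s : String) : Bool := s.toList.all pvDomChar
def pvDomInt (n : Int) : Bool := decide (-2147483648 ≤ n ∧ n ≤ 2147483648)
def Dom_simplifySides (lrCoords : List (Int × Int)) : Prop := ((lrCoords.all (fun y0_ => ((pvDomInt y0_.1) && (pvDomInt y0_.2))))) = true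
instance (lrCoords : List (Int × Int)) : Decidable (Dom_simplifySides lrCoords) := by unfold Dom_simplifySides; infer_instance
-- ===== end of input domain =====

-- B replaces A's destructive pop/remove flood-fill by one non-destructive pass counting
-- run bottoms (simpler).  Python A empties lrCoords in place; Python B reproduces that by
-- clearing it; the equivalence proved here is about the RETURN value only.


-- ===== PORT A =====
-- first for-loop: for i in range(1, len(l)+1): newY = y+i; if (newY,x) in l: l.remove((newY,x)) else: break
-- (fuel = number of remaining range iterations, n + 1 - i at entry; purely a totality device)
def pvForUpGo (y x : Int) : Nat → Nat → List (Int × Int) → List (Int × Int)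
  | 0, _, l => l
  | fuel + 1, i, l =>
      if (y + (i : Int), x) ∈ l then
        pvForUpGo y x fuel (i + 1) ((PySem.List.remove? l (y + (i : Int), x)).getD l)
      else l

def pvForUp (y x : Int) (i n : Nat) (l : List (Int × Int)) : List (Int × Int) :=
  pvForUpGo y x (n + 1 - i) i l

-- second for-loop, with newY = y - i
def pvForDownGo (y x : Int) : Nat → Nat → List (Int × Int) → List (Int × Int)
  | 0, _, l => l
  | fuel + 1, i, l =>
      if (y - (i : Int), x) ∈ l then
        pvForDownGo y x fuel (i + 1) ((PySem.List.remove? l (y - (i : Int), x)).getD l)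
      else l

def pvForDown (y x : Int) (i n : Nat) (l : List (Int × Int)) : List (Int × Int) :=
  pvForDownGo y x (n + 1 - i) i l

-- while len(lrCoords) > 0: pop the last element, strip the run above then below, count one
-- side (fuel = initial length: each pass removes at least the popped element)
def pvWhileGo : Nat → List (Int × Int) → Int → Int
  | 0, _, sides => sides
  | fuel + 1, l, sides =>
      match PySem.List.pop? l with
      | none => sides
      | some ((y, x), rest) =>
          let l1 := pvForUp y x 1 rest.length rest
          let l2 := pvForDown y x 1 l1.length l1
          pvWhileGo fuel l2 (sides + 1)

def simplifySides (lrCoords : List (Int × Int)) : Int :=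
  pvWhileGo lrCoords.length lrCoords 0

-- ===== PORT B =====
-- sides = sum(1 for y, x in lrCoords if (y - 1, x) not in lrCoords)
def simplifySides_alt (lrCoords : List (Int × Int)) : Int :=
  lrCoords.foldl (fun sides p => if (p.1 - 1, p.2) ∈ lrCoords then sides else sides + 1) 0

-- ===== PRECONDITION & SPEC =====
-- Pre_ excludes lists with duplicate coordinates (the caller passes a set): there A's
-- pop/remove bookkeeping counts duplicates in an order-dependent way no one would specify.
def Pre_simplifySides (lrCoords : List (Int × Int)) : Prop := lrCoords.Nodup
instance (lrCoords : List (Int × Int)) : Decidable (Pre_simplifySides lrCoords) := by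
  unfold Pre_simplifySides; infer_instance

def pvWitness_simplifySides : (List (Int × Int)) := [(0, 0), (1, 0), (3, 0), (0, 1)]

def Spec_simplifySides (lrCoords : List (Int × Int)) (out : Int) : Prop := out = simplifySides_alt lrCoords
instance (lrCoords : List (Int × Int)) (out : Int) : Decidable (Spec_simplifySides lrCoords out) := by
  unfold Spec_simplifySides; infer_instance

-- ===== CLAIM (what is proved, stated in full; the proofs are below) =====
def Claim_equal_simplifySides : Prop := ∀ (lrCoords : List (Int × Int)), Dom_simplifySides lrCoords → Pre_simplifySides lrCoords → Spec_simplifySides lrCoords (simplifySides lrCoords)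

-- ===== LEMMAS AND PROOFS =====

-- number of "run bottoms" of the list: elements whose vertical predecessor is absent
def rsc (l : List (Int × Int)) : Int :=
  (l.countP (fun p => !decide ((p.1 - 1, p.2) ∈ l)) : Nat)

theorem rsc_perm {l l' : List (Int × Int)} (h : l.Perm l') : rsc l = rsc l' := by
  unfold rsc
  have h1 : l.countP (fun p => !decide ((p.1 - 1, p.2) ∈ l))
      = l.countP (fun p => !decide ((p.1 - 1, p.2) ∈ l')) := by
    refine List.countP_congr (fun p _ => ?_)
    simp [h.mem_iff]
  rw [h1, h.countP_eq]

theorem countP_shift {α : Type} [DecidableEq α] (q q' : α → Bool) (v : α)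
    (l : List α) (hl : l.Nodup)
    (hsame : ∀ p ∈ l, p ≠ v → q p = q' p) (hv : q v = false) (hv' : q' v = true) :
    l.countP q' = l.countP q + (if v ∈ l then 1 else 0) := by
  induction l with
  | nil => simp
  | cons a t ih =>
      rcases List.nodup_cons.mp hl with ⟨ha, ht⟩
      by_cases hav : a = v
      · subst hav
        have heq : t.countP q' = t.countP q := by
          refine List.countP_congr (fun p hp => ?_)
          have := hsame p (List.mem_cons_of_mem a hp) (fun h => ha (h ▸ hp))
          simp [this]
        simp [hv, hv', heq]
      · have hq : q a = q' a := hsame a List.mem_cons_self hav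
        have hih := ih ht (fun p hp hpv => hsame p (List.mem_cons_of_mem a hp) hpv)
        simp only [List.countP_cons, hih, hq, List.mem_cons]
        by_cases hvt : v ∈ t <;> simp [hvt, Ne.symm hav] <;> try omega

theorem rsc_cons (e : Int × Int) (l : List (Int × Int)) (h : (e :: l).Nodup) :
    rsc l = rsc (e :: l) + (if (e.1 + 1, e.2) ∈ l then (1 : Int) else 0)
      - (if (e.1 - 1, e.2) ∈ l then 0 else 1) := by
  rcases List.nodup_cons.mp h with ⟨hel, hl⟩
  have hne : ((e.1 - 1, e.2) : Int × Int) ≠ e := by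
    intro hh; have h1 := congrArg Prod.fst hh; simp at h1
  have hshift := countP_shift
    (fun p : Int × Int => !decide ((p.1 - 1, p.2) ∈ e :: l))
    (fun p : Int × Int => !decide ((p.1 - 1, p.2) ∈ l))
    (e.1 + 1, e.2) l hl
    (by
      intro p hp hpv
      have hpe : ((p.1 - 1, p.2) : Int × Int) ≠ e := by
        intro hh
        apply hpv
        have h1 := congrArg Prod.fst hh; have h2 := congrArg Prod.snd hh
        simp at h1 h2
        exact Prod.ext (by omega) (by simpa using h2)
      simp [List.mem_cons, hpe])
    (by simp) (by simp [hel])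
  unfold rsc
  rw [List.countP_cons, hshift]
  by_cases h1 : ((e.1 + 1, e.2) : Int × Int) ∈ l <;>
    by_cases h2 : ((e.1 - 1, e.2) : Int × Int) ∈ l <;>
      simp [h1, h2, List.mem_cons, hne]

theorem rsc_erase {l : List (Int × Int)} {e : Int × Int} (h : l.Nodup) (he : e ∈ l) :
    rsc (l.erase e) = rsc l + (if (e.1 + 1, e.2) ∈ l then (1 : Int) else 0)
      - (if (e.1 - 1, e.2) ∈ l then 0 else 1) := by
  have hperm := List.perm_cons_erase he
  have hnd : (e :: l.erase e).Nodup := hperm.nodup_iff.mp h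
  have hc := rsc_cons e (l.erase e) hnd
  rw [← rsc_perm hperm] at hc
  have m1 : ((e.1 + 1, e.2) ∈ l.erase e) ↔ ((e.1 + 1, e.2) ∈ l) := by
    rw [h.mem_erase_iff]
    constructor
    · exact fun hh => hh.2
    · intro hm; refine ⟨?_, hm⟩
      intro hh; have h1 := congrArg Prod.fst hh; simp at h1
  have m2 : ((e.1 - 1, e.2) ∈ l.erase e) ↔ ((e.1 - 1, e.2) ∈ l) := by
    rw [h.mem_erase_iff]
    constructor
    · exact fun hh => hh.2
    · intro hm; refine ⟨?_, hm⟩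
      intro hh; have h1 := congrArg Prod.fst hh; simp at h1
  simp only [m1, m2] at hc
  exact hc

theorem pvForUpGo_sublist (y x : Int) :
    ∀ (fuel i : Nat) (l : List (Int × Int)), List.Sublist (pvForUpGo y x fuel i l) l := by
  intro fuel
  induction fuel with
  | zero => intro i l; exact List.Sublist.refl l
  | succ fuel ih =>
      intro i l
      simp only [pvForUpGo]
      by_cases hm : ((y + (i : Int), x) : Int × Int) ∈ l
      · rw [if_pos hm, PySem.List.remove?_eq_some_erase l _ hm, Option.getD_some]
        exact (ih _ _).trans (List.erase_sublist ..)
      · rw [if_neg hm]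

theorem pvForDownGo_sublist (y x : Int) :
    ∀ (fuel i : Nat) (l : List (Int × Int)), List.Sublist (pvForDownGo y x fuel i l) l := by
  intro fuel
  induction fuel with
  | zero => intro i l; exact List.Sublist.refl l
  | succ fuel ih =>
      intro i l
      simp only [pvForDownGo]
      by_cases hm : ((y - (i : Int), x) : Int × Int) ∈ l
      · rw [if_pos hm, PySem.List.remove?_eq_some_erase l _ hm, Option.getD_some]
        exact (ih _ _).trans (List.erase_sublist ..)
      · rw [if_neg hm]

theorem pvForUp_sublist (y x : Int) (i n : Nat) (l : List (Int × Int)) :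
    List.Sublist (pvForUp y x i n l) l := pvForUpGo_sublist y x (n + 1 - i) i l

theorem pvForDown_sublist (y x : Int) (i n : Nat) (l : List (Int × Int)) :
    List.Sublist (pvForDown y x i n l) l := pvForDownGo_sublist y x (n + 1 - i) i l

theorem pvForUp_nodup {y x : Int} {i n : Nat} {l : List (Int × Int)} (h : l.Nodup) :
    (pvForUp y x i n l).Nodup := (pvForUp_sublist y x i n l).nodup h

theorem pvForUpGo_mem (y x : Int) :
    ∀ (fuel i : Nat) (l : List (Int × Int)) (p : Int × Int),
      p ∈ l → p.1 < y + (i : Int) → p ∈ pvForUpGo y x fuel i l := by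
  intro fuel
  induction fuel with
  | zero => intro i l p hp _; exact hp
  | succ fuel ih =>
      intro i l p hp hlt
      simp only [pvForUpGo]
      by_cases hm : ((y + (i : Int), x) : Int × Int) ∈ l
      · rw [if_pos hm, PySem.List.remove?_eq_some_erase l _ hm, Option.getD_some]
        refine ih (i + 1) _ p ?_ (by push_cast; omega)
        refine (List.mem_erase_of_ne ?_).mpr hp
        intro hh; have h1 := congrArg Prod.fst hh; simp at h1; omega
      · rw [if_neg hm]; exact hp

theorem pvForUp_mem {y x : Int} (i n : Nat) (l : List (Int × Int)) (p : Int × Int) :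
    p ∈ l → p.1 < y + (i : Int) → p ∈ pvForUp y x i n l :=
  pvForUpGo_mem y x (n + 1 - i) i l p

theorem pvForUpGo_rsc (y x : Int) :
    ∀ (fuel i : Nat) (l : List (Int × Int)), l.Nodup → (y + (i : Int) - 1, x) ∉ l →
      l.length ≤ fuel →
      rsc (pvForUpGo y x fuel i l) = rsc l - (if (y + (i : Int), x) ∈ l then 1 else 0) := by
  intro fuel
  induction fuel with
  | zero =>
      intro i l _ _ hlen
      have hnil : l = [] := List.length_eq_zero_iff.mp (by omega)
      subst hnil; simp [pvForUpGo, rsc]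
  | succ fuel ih =>
      intro i l h hinv hlen
      simp only [pvForUpGo]
      by_cases hm : ((y + (i : Int), x) : Int × Int) ∈ l
      · rw [if_pos hm, PySem.List.remove?_eq_some_erase l _ hm, Option.getD_some]
        have hnd := h.erase (y + (i : Int), x)
        have hlen' : (l.erase (y + (i : Int), x)).length ≤ fuel := by
          rw [List.length_erase_of_mem hm]
          have := List.length_pos_of_mem hm
          omega
        have hinv' : (y + ((i + 1 : Nat) : Int) - 1, x) ∉ l.erase (y + (i : Int), x) := by
          intro hmem
          exact (h.mem_erase_iff.mp hmem).1 (Prod.ext (by push_cast; ring) rfl)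
        have hm2 : ((y + (i : Int) + 1, x) ∈ l.erase (y + (i : Int), x))
            ↔ ((y + (i : Int) + 1, x) ∈ l) := by
          rw [h.mem_erase_iff]
          constructor
          · exact fun hh => hh.2
          · intro hmm; refine ⟨?_, hmm⟩
            intro hh; have h1 := congrArg Prod.fst hh; simp at h1
        rw [ih (i + 1) _ hnd hinv' hlen']
        have he := rsc_erase h hm
        have harr : y + ((i + 1 : Nat) : Int) = y + (i : Int) + 1 := by push_cast; ring
        simp only [harr, hm2, he]
        by_cases hup : ((y + (i : Int) + 1, x) : Int × Int) ∈ l <;>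
          simp [hup, hm, hinv]
      · rw [if_neg hm]; simp [hm]

theorem pvForUp_rsc (y x : Int) (i n : Nat) (l : List (Int × Int)) :
    l.Nodup → (y + (i : Int) - 1, x) ∉ l → l.length + i ≤ n + 1 →
    rsc (pvForUp y x i n l) = rsc l - (if (y + (i : Int), x) ∈ l then 1 else 0) :=
  fun h hinv hlen => pvForUpGo_rsc y x (n + 1 - i) i l h hinv (by omega)

theorem pvForDownGo_rsc (y x : Int) :
    ∀ (fuel i : Nat) (l : List (Int × Int)), l.Nodup → (y - (i : Int) + 1, x) ∉ l →
      l.length ≤ fuel →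
      rsc (pvForDownGo y x fuel i l) = rsc l - (if (y - (i : Int), x) ∈ l then 1 else 0) := by
  intro fuel
  induction fuel with
  | zero =>
      intro i l _ _ hlen
      have hnil : l = [] := List.length_eq_zero_iff.mp (by omega)
      subst hnil; simp [pvForDownGo, rsc]
  | succ fuel ih =>
      intro i l h hinv hlen
      simp only [pvForDownGo]
      by_cases hm : ((y - (i : Int), x) : Int × Int) ∈ l
      · rw [if_pos hm, PySem.List.remove?_eq_some_erase l _ hm, Option.getD_some]
        have hnd := h.erase (y - (i : Int), x)
        have hlen' : (l.erase (y - (i : Int), x)).length ≤ fuel := by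
          rw [List.length_erase_of_mem hm]
          have := List.length_pos_of_mem hm
          omega
        have hinv' : (y - ((i + 1 : Nat) : Int) + 1, x) ∉ l.erase (y - (i : Int), x) := by
          intro hmem
          exact (h.mem_erase_iff.mp hmem).1 (Prod.ext (by push_cast; ring) rfl)
        have hm2 : ((y - (i : Int) - 1, x) ∈ l.erase (y - (i : Int), x))
            ↔ ((y - (i : Int) - 1, x) ∈ l) := by
          rw [h.mem_erase_iff]
          constructor
          · exact fun hh => hh.2
          · intro hmm; refine ⟨?_, hmm⟩
            intro hh; have h1 := congrArg Prod.fst hh; simp at h1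
        rw [ih (i + 1) _ hnd hinv' hlen']
        have he := rsc_erase h hm
        have harr : y - ((i + 1 : Nat) : Int) = y - (i : Int) - 1 := by push_cast; ring
        simp only [harr, hm2, he]
        by_cases hdn : ((y - (i : Int) - 1, x) : Int × Int) ∈ l <;>
          simp [hdn, hm, hinv]
      · rw [if_neg hm]; simp [hm]

theorem pvForDown_rsc (y x : Int) (i n : Nat) (l : List (Int × Int)) :
    l.Nodup → (y - (i : Int) + 1, x) ∉ l → l.length + i ≤ n + 1 →
    rsc (pvForDown y x i n l) = rsc l - (if (y - (i : Int), x) ∈ l then 1 else 0) :=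
  fun h hinv hlen => pvForDownGo_rsc y x (n + 1 - i) i l h hinv (by omega)

theorem pvWhile_pop_none {l : List (Int × Int)} (hp : PySem.List.pop? l = none) :
    l = [] := by
  cases l with
  | nil => rfl
  | cons a t =>
      exfalso
      have hne : (a :: t) ≠ [] := by simp
      have hsp := List.dropLast_append_getLast hne
      rw [← hsp, PySem.List.pop?_last] at hp
      simp at hp

theorem pvWhileGo_rsc : ∀ (fuel : Nat) (l : List (Int × Int)) (s : Int),
    l.length ≤ fuel → l.Nodup → pvWhileGo fuel l s = s + rsc l := by
  intro fuel
  induction fuel with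
  | zero =>
      intro l s hlen _
      have hnil : l = [] := List.length_eq_zero_iff.mp (by omega)
      subst hnil
      simp [pvWhileGo, rsc]
  | succ fuel ihN =>
      intro l s hlen h
      rcases hp : PySem.List.pop? l with _ | ⟨⟨y, x⟩, rest⟩
      · have hnil : l = [] := pvWhile_pop_none hp
        subst hnil
        simp [pvWhileGo, PySem.List.pop?, PySem.List.pyIdx?, rsc]
      · simp only [pvWhileGo, hp]
        have hne : l ≠ [] := by
          intro hh; subst hh; simp [PySem.List.pop?] at hp
        have hsplit : l.dropLast ++ [l.getLast hne] = l := List.dropLast_append_getLast hne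
        have hp2 : PySem.List.pop? l = some (l.getLast hne, l.dropLast) := by
          conv_lhs => rw [← hsplit]
          exact PySem.List.pop?_last _ _
        rw [hp] at hp2
        have hpair := Option.some_inj.mp hp2
        have hyx : l.getLast hne = (y, x) := (congrArg Prod.fst hpair).symm
        have hrest : rest = l.dropLast := congrArg Prod.snd hpair
        have hperm : l.Perm ((y, x) :: rest) := by
          rw [hrest, ← hyx]
          conv_lhs => rw [← hsplit]
          exact List.perm_append_singleton _ _
        have hnd2 : ((y, x) :: rest).Nodup := hperm.nodup_iff.mp h
        rcases List.nodup_cons.mp hnd2 with ⟨hyxr, hrestnd⟩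
        have hc := rsc_cons (y, x) rest hnd2
        rw [← rsc_perm hperm] at hc
        have hlrest : rest.length + 1 = l.length := PySem.List.length_of_pop?_eq_some l hp
        -- strip up
        have hinv1 : (y + ((1 : Nat) : Int) - 1, x) ∉ rest := by
          have e1 : y + ((1 : Nat) : Int) - 1 = y := by push_cast; ring
          rw [e1]; exact hyxr
        have hup := pvForUp_rsc y x 1 rest.length rest hrestnd hinv1 (by omega)
        have hl1nd : (pvForUp y x 1 rest.length rest).Nodup := pvForUp_nodup hrestnd
        have hmemdown : ((y - 1, x) ∈ pvForUp y x 1 rest.length rest) ↔ ((y - 1, x) ∈ rest) := by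
          constructor
          · exact fun hh => List.Sublist.mem hh (pvForUp_sublist y x 1 rest.length rest)
          · intro hh
            exact pvForUp_mem 1 rest.length rest (y - 1, x) hh (by push_cast; omega)
        have hyx1 : ((y, x) : Int × Int) ∉ pvForUp y x 1 rest.length rest := by
          intro hh
          exact hyxr (List.Sublist.mem hh (pvForUp_sublist y x 1 rest.length rest))
        have hinv2 : (y - ((1 : Nat) : Int) + 1, x) ∉ pvForUp y x 1 rest.length rest := by
          have e1 : y - ((1 : Nat) : Int) + 1 = y := by push_cast; ring
          rw [e1]; exact hyx1
        have hdown := pvForDown_rsc y x 1 (pvForUp y x 1 rest.length rest).length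
          (pvForUp y x 1 rest.length rest) hl1nd hinv2 (by omega)
        simp only [Nat.cast_one] at hup hdown
        have hstep : rsc (pvForDown y x 1 (pvForUp y x 1 rest.length rest).length
            (pvForUp y x 1 rest.length rest)) = rsc l - 1 := by
          rw [hdown, hup]
          simp only [hmemdown]
          by_cases hu : ((y + 1, x) : Int × Int) ∈ rest <;>
            by_cases hd : ((y - 1, x) : Int × Int) ∈ rest <;>
              simp [hu, hd] at hc ⊢ <;> omega
        have hl2nd : (pvForDown y x 1 (pvForUp y x 1 rest.length rest).length
            (pvForUp y x 1 rest.length rest)).Nodup :=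
          (pvForDown_sublist y x 1 _ _).nodup hl1nd
        have hlen2 : (pvForDown y x 1 (pvForUp y x 1 rest.length rest).length
            (pvForUp y x 1 rest.length rest)).length ≤ fuel := by
          have ha := (pvForDown_sublist y x 1 (pvForUp y x 1 rest.length rest).length
            (pvForUp y x 1 rest.length rest)).length_le
          have hb := (pvForUp_sublist y x 1 rest.length rest).length_le
          omega
        rw [ihN _ (s + 1) hlen2 hl2nd, hstep]
        ring

theorem alt_eq_rsc (l : List (Int × Int)) : simplifySides_alt l = rsc l := by
  unfold simplifySides_alt rsc
  suffices hgen : ∀ (t : List (Int × Int)) (s : Int),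
      t.foldl (fun sides p => if (p.1 - 1, p.2) ∈ l then sides else sides + 1) s
        = s + (t.countP (fun p => !decide ((p.1 - 1, p.2) ∈ l)) : Nat) by
    simpa using hgen l 0
  intro t
  induction t with
  | nil => simp
  | cons a t ih =>
      intro s
      simp only [List.foldl_cons, List.countP_cons, ih]
      by_cases hm : (a.1 - 1, a.2) ∈ l <;> simp [hm] <;> try omega

-- ===== VERDICT (by name: the statement is the Claim_ definition above) =====
theorem simplifySides_spec : Claim_equal_simplifySides := by
  intro l _ hpre
  show simplifySides l = simplifySides_alt l
  rw [alt_eq_rsc]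
  have hw := pvWhileGo_rsc l.length l 0 (le_refl _) hpre
  simpa [simplifySides] using hw
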